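-- pv_equiv track=rewrite | github.com/Anatorini-1/foreward-error-correction | encoder.py | __hamming_word
-- ===== SOURCE A (Python) =====
-- def __hamming_word(data, redundancy):
--     """Encodes the data using the hamming code.
--
--     Args:
--         data (list): list of bits to encode. Must be the length of one codeword worth of data.
--         redundancy (int): amount of redundancy bits per codeword. Must be less than the length of the data.
--
--     Returns:
--         list: codeword representing the data, with the redundancy bits
--     """
--     blockLen = 2**redundancy - 1
--     dataLen = blockLen-redundancy
--     keys = [x for x in range(1, blockLen+1)]
--     parityKeys = [2**x for x in range(redundancy)]
--     dataKeys = [x for x in keys if x not in parityKeys]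
--     codeWord = [2 for _ in range(blockLen)]
--     for i in range(dataLen):
--         codeWord[dataKeys[i]-1] = data[i]
--     for i in parityKeys:
--         sum = 0
--         for k in keys:
--             if k & i:
--                 sum += codeWord[k-1]
--         codeWord[i-1] = sum % 2
--
--     return codeWord
-- ===== SOURCE B (Python) =====
-- def __hamming_word(data, redundancy):
--     """Encode one Hamming codeword: single XOR-syndrome pass instead of one nested scan per parity bit."""
--     blockLen = 2 ** redundancy - 1
--     codeWord = [2] * blockLen
--     j = 0
--     for pos in range(3, blockLen + 1):
--         if pos & (pos - 1):          # not a power of two: data position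
--             codeWord[pos - 1] = data[j]
--             j += 1
--     s = 0
--     for pos in range(1, blockLen + 1):
--         if codeWord[pos - 1] & 1:
--             s ^= pos
--     for b in range(redundancy):
--         codeWord[(1 << b) - 1] = (s >> b) & 1
--     return codeWord
-- ===== Notes on version B (the rewrite author's own statement) =====
-- stated objective: alternative
-- what changed: Replaces the keys/parityKeys/dataKeys list machinery and the nested per-parity-bit scan by a single pass that places data at non-power-of-two positions and one XOR-syndrome accumulation over positions, from which every parity bit is read off as one bit of the syndrome.
import Mathlib
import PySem

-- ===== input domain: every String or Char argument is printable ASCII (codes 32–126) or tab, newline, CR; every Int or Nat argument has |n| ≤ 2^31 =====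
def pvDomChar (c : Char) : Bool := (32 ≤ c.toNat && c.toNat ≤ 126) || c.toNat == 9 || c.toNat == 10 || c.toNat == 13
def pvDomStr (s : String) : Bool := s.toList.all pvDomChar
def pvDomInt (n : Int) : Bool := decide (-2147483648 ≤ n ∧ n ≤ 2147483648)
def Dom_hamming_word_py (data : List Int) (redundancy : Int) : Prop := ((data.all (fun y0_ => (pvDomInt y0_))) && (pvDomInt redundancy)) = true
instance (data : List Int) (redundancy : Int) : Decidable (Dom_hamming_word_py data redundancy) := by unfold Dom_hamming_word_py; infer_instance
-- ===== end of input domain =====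

-- B replaces the per-parity-bit nested scans by a single XOR-syndrome pass over positions: a different algorithm with the same output.


-- ===== PORT A =====
-- Literal transliteration of __hamming_word; indices fed to pySetD/pyGetD are
-- nonnegative and in range under Pre_, where these total forms are exact.
def hamming_word_py (data : List Int) (redundancy : Int) : List Int :=
  let blockLen : Int := 2 ^ redundancy.toNat - 1          -- 2**redundancy - 1 (Pre_ gives redundancy ≥ 0)
  let dataLen : Int := blockLen - redundancy
  let keys : List Int := PySem.List.pyRange 1 (blockLen + 1) 1
  let parityKeys : List Int := (PySem.List.pyRange 0 redundancy 1).map (fun x => (2:Int) ^ x.toNat)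
  let dataKeys : List Int := keys.filter (fun x => !(parityKeys.contains x))
  let codeWord : List Int := (PySem.List.pyRange 0 blockLen 1).map (fun _ => (2:Int))
  let codeWord := (PySem.List.pyRange 0 dataLen 1).foldl (fun cw i =>
      PySem.List.pySetD cw (PySem.List.pyGetD dataKeys i 0 - 1) (PySem.List.pyGetD data i 0)) codeWord
  parityKeys.foldl (fun cw i =>
      let sum := keys.foldl (fun s k =>
          if PySem.Int.band k i ≠ 0 then s + PySem.List.pyGetD cw (k - 1) 0 else s) 0
      PySem.List.pySetD cw (i - 1) (PySem.Int.mod sum 2)) codeWord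

-- ===== PORT B =====
def hamming_word_py_alt (data : List Int) (redundancy : Int) : List Int :=
  let blockLen : Int := 2 ^ redundancy.toNat - 1          -- 2**redundancy - 1
  let codeWord : List Int := List.replicate blockLen.toNat 2        -- [2] * blockLen
  let st := (PySem.List.pyRange 3 (blockLen + 1) 1).foldl (fun (st : List Int × Int) pos =>
      if PySem.Int.band pos (pos - 1) ≠ 0 then
        (PySem.List.pySetD st.1 (pos - 1) (PySem.List.pyGetD data st.2 0), st.2 + 1)
      else st) (codeWord, 0)
  let codeWord := st.1
  let s : Int := (PySem.List.pyRange 1 (blockLen + 1) 1).foldl (fun s pos =>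
      if PySem.Int.band (PySem.List.pyGetD codeWord (pos - 1) 0) 1 ≠ 0 then PySem.Int.bxor s pos else s) 0
  (PySem.List.pyRange 0 redundancy 1).foldl (fun cw b =>
      PySem.List.pySetD cw ((1 <<< b.toNat) - 1) (PySem.Int.band (s >>> b.toNat) 1)) codeWord

-- ===== PRECONDITION & SPEC =====
-- Pre_: exactly the inputs where A returns: redundancy ≥ 0 (2**redundancy is a float
-- for negative redundancy, TypeError downstream) and data holds at least one
-- codeword's worth of bits (else data[i] raises IndexError).
def Pre_hamming_word_py (data : List Int) (redundancy : Int) : Prop :=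
  0 ≤ redundancy ∧ (2:Int) ^ redundancy.toNat - 1 - redundancy ≤ data.length
instance (data : List Int) (redundancy : Int) : Decidable (Pre_hamming_word_py data redundancy) := by
  unfold Pre_hamming_word_py; infer_instance
def pvWitness_hamming_word_py : List Int × Int := ([1], 2)

def Spec_hamming_word_py (data : List Int) (redundancy : Int) (out : List Int) : Prop := out = hamming_word_py_alt data redundancy
instance (data : List Int) (redundancy : Int) (out : List Int) : Decidable (Spec_hamming_word_py data redundancy out) := by unfold Spec_hamming_word_py; infer_instance

-- ===== CLAIM (what is proved, stated in full; the proofs are below) =====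
def Claim_equal_hamming_word_py : Prop := ∀ (data : List Int) (redundancy : Int), Dom_hamming_word_py data redundancy → Pre_hamming_word_py data redundancy → Spec_hamming_word_py data redundancy (hamming_word_py data redundancy)

-- ===== LEMMAS AND PROOFS =====

def pvKeysN (n : Nat) : List Nat := (List.range n).map (· + 1)
def pvPred (p : Nat) : Bool := p &&& (p - 1) != 0
theorem pv_pow2_and_pred (c : Nat) : 2 ^ c &&& (2 ^ c - 1) = 0 := by
  apply Nat.eq_of_testBit_eq; intro i; simp
theorem pv_and_pred_pow2 {p : Nat} (hp : 1 ≤ p) (h : p &&& (p - 1) = 0) : ∃ c, p = 2 ^ c := by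
  refine ⟨p.log2, ?_⟩
  have h1 : 2 ^ p.log2 ≤ p := Nat.log2_self_le (by omega)
  have h2 : p < 2 ^ (p.log2 + 1) := Nat.lt_log2_self
  by_contra hne
  have hb1 : p.testBit p.log2 = true :=
    Nat.testBit_of_two_pow_le_and_two_pow_add_one_gt h1 h2
  have hb2 : (p - 1).testBit p.log2 = true :=
    Nat.testBit_of_two_pow_le_and_two_pow_add_one_gt (by omega) (by omega)
  have hb : (p &&& (p - 1)).testBit p.log2 = true := by
    simp [Nat.testBit_and, hb1, hb2]
  rw [h] at hb; simp at hb

theorem pv_parityFilter (r : Nat) :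
    (pvKeysN (2 ^ r - 1)).filter (fun p => !(pvPred p)) = (List.range r).map (2 ^ ·) := by
  induction r with
  | zero => simp [pvKeysN]
  | succ r ih =>
      have hsplit : 2 ^ (r + 1) - 1 = (2 ^ r - 1) + 2 ^ r := by
        have : 1 ≤ 2 ^ r := Nat.one_le_two_pow
        omega
      rw [hsplit]
      have hkeys : pvKeysN ((2 ^ r - 1) + 2 ^ r)
          = pvKeysN (2 ^ r - 1) ++ (List.range (2 ^ r)).map (fun x => (2 ^ r - 1) + x + 1) := by
        unfold pvKeysN
        rw [List.range_add, List.map_append, List.map_map]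
        rfl
      rw [hkeys, List.filter_append, ih, List.range_succ, List.map_append]
      congr 1
      have hpow : 1 ≤ 2 ^ r := Nat.one_le_two_pow
      have hrange : List.range (2 ^ r) = 0 :: (List.range (2 ^ r - 1)).map Nat.succ := by
        conv_lhs => rw [show 2 ^ r = (2 ^ r - 1) + 1 by omega]
        exact List.range_succ_eq_map
      rw [hrange]
      simp only [List.map_cons, List.filter_cons, List.map_map]
      have h0 : (!pvPred ((2 ^ r - 1) + 0 + 1)) = true := by
        have he : (2 ^ r - 1) + 0 + 1 = 2 ^ r := by omega
        rw [he]; simp [pvPred, pv_pow2_and_pred]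
      rw [if_pos h0]
      simp only [Function.comp_def]
      have hnil : ((List.range (2 ^ r - 1)).map (fun x => 2 ^ r - 1 + Nat.succ x + 1)).filter
          (fun p => !(pvPred p)) = [] := by
        apply List.filter_eq_nil_iff.mpr
        intro a ha
        rcases List.mem_map.mp ha with ⟨t, ht, rfl⟩
        have htb := List.mem_range.mp ht
        intro hfalse
        have hz' : pvPred (2 ^ r - 1 + Nat.succ t + 1) = false := by
          simpa using hfalse
        have hz : (2 ^ r - 1 + Nat.succ t + 1) &&& (2 ^ r - 1 + Nat.succ t + 1 - 1) = 0 := by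
          simpa [pvPred] using hz'
        rcases pv_and_pred_pow2 (p := 2 ^ r - 1 + Nat.succ t + 1) (by omega) hz with ⟨c, hc⟩
        have hlow : 2 ^ r < 2 ^ c := by omega
        have hhigh : 2 ^ c < 2 ^ (r + 1) := by
          have h2 : 2 ^ (r + 1) = 2 ^ r + 2 ^ r := by ring
          omega
        have c1 : r < c := (Nat.pow_lt_pow_iff_right (by norm_num)).mp hlow
        have c2 : c < r + 1 := (Nat.pow_lt_pow_iff_right (by norm_num)).mp hhigh
        omega
      rw [hnil]
      simp; omega

def pvDkN (n : Nat) : List Nat := (pvKeysN n).filter pvPred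
theorem pv_two_pow_and {c m : Nat} (h : c ≠ m) : 2 ^ c &&& 2 ^ m = 0 := by
  simp [Nat.and_two_pow, Nat.testBit_two_pow, h]
def pvCast (L : List Nat) : List Int := L.map (fun (p : Nat) => (p : Int))
def pvPlace (data : List Int) (L : List (Nat × Nat)) (cw : List Int) : List Int :=
  L.foldl (fun cw pi => cw.set (pi.1 - 1) (data.getD pi.2 0)) cw

theorem pv_rangeFold (data : List Int) : ∀ (L : List Nat) (s : Nat) (cw : List Int),
      (List.range L.length).foldl (fun cw i => cw.set (L.getD i 0 - 1) (data.getD (i + s) 0)) cw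
        = pvPlace data (L.zipIdx s) cw := by
  intro L
  induction L with
  | nil => intro s cw; simp [pvPlace]
  | cons x L ih =>
      intro s cw
      rw [List.length_cons, List.range_succ_eq_map, List.foldl_cons, List.foldl_map]
      simp only [List.getD_cons_zero, Nat.zero_add]
      have hbody : ∀ (cw' : List Int) (i : Nat),
          cw'.set ((x :: L).getD (i + 1) 0 - 1) (data.getD (i + 1 + s) 0)
            = cw'.set (L.getD i 0 - 1) (data.getD (i + (s + 1)) 0) := by
        intro cw' i
        have h1 : (x :: L).getD (i + 1) 0 = L.getD i 0 := by
          simp [List.getD_cons_succ]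
        rw [h1, show i + 1 + s = i + (s + 1) from by omega]
      rw [PySem.List.foldl_congr_mem _ _ _ _ (by intro cw' i _; exact hbody cw' i)]
      rw [ih (s + 1)]
      simp [pvPlace, List.zipIdx_cons]

theorem pv_counterFold (data : List Int) : ∀ (P : List Nat), (∀ p ∈ P, 1 ≤ p) →
    ∀ (cw : List Int) (j : Nat),
      (pvCast P).foldl (fun (st : List Int × Int) pos =>
          if PySem.Int.band pos (pos - 1) ≠ 0 then
            (PySem.List.pySetD st.1 (pos - 1) (PySem.List.pyGetD data st.2 0), st.2 + 1)
          else st) (cw, (j : Int))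
        = (pvPlace data ((P.filter pvPred).zipIdx j) cw, ((j + (P.filter pvPred).length : Nat) : Int)) := by
  intro P
  induction P with
  | nil => intro _ cw j; simp [pvCast, pvPlace]
  | cons p P ih =>
      intro hP cw j
      have hp1 : 1 ≤ p := hP p (by simp)
      have hcast : ((p : Int)) - 1 = ((p - 1 : Nat) : Int) := by
        push_cast [hp1]; ring
      have hband : PySem.Int.band (p : Int) ((p : Int) - 1) = ((p &&& (p - 1) : Nat) : Int) := by
        rw [hcast]; exact PySem.Int.band_natCast p (p - 1)
      have hcc : pvCast (p :: P) = (p : Int) :: pvCast P := by simp [pvCast]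
      rw [hcc, List.foldl_cons]
      by_cases hcond : p &&& (p - 1) ≠ 0
      · rw [if_pos (by rw [hband]; exact_mod_cast hcond)]
        simp only [PySem.List.pyGetD_natCast, hcast, PySem.List.pySetD_natCast]
        have : ((j : Int) + 1) = ((j + 1 : Nat) : Int) := by push_cast; ring
        rw [this, ih (fun q hq => hP q (by simp [hq]))]
        have hfilter : (p :: P).filter pvPred = p :: P.filter pvPred := by
          simp [List.filter_cons, pvPred, hcond]
        rw [hfilter]
        simp [pvPlace, List.zipIdx_cons]
        ring
      · rw [if_neg (by rw [hband]; simpa using hcond)]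
        rw [ih (fun q hq => hP q (by simp [hq]))]
        have hfilter : (p :: P).filter pvPred = P.filter pvPred := by
          simp only [List.filter_cons, pvPred]
          simp [hcond]
        rw [hfilter]

theorem pv_synFold (cw : List Int) : ∀ (K : List Nat), (∀ k ∈ K, 1 ≤ k) → ∀ (s : Nat),
      (pvCast K).foldl (fun (s : Int) pos =>
          if PySem.Int.band (PySem.List.pyGetD cw (pos - 1) 0) 1 ≠ 0 then PySem.Int.bxor s pos else s) (s : Int)
        = ((K.foldl (fun s k => if (cw.getD (k - 1) 0) % 2 ≠ 0 then s ^^^ k else s) s : Nat) : Int) := by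
  intro K
  induction K with
  | nil => intro _ s; simp [pvCast]
  | cons k K ih =>
      intro hK s
      have hk1 : 1 ≤ k := hK k (by simp)
      have hcast : ((k : Int)) - 1 = ((k - 1 : Nat) : Int) := by push_cast [hk1]; ring
      have hcc : pvCast (k :: K) = (k : Int) :: pvCast K := by simp [pvCast]
      rw [hcc, List.foldl_cons, List.foldl_cons]
      have hget : PySem.List.pyGetD cw ((k : Int) - 1) 0 = cw.getD (k - 1) 0 := by
        rw [hcast, PySem.List.pyGetD_natCast]
      have hcond : (PySem.Int.band (PySem.List.pyGetD cw ((k : Int) - 1) 0) 1 ≠ 0)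
          ↔ ((cw.getD (k - 1) 0) % 2 ≠ 0) := by
        rw [hget, PySem.Int.band_one, PySem.Int.mod_eq_emod_of_pos (by norm_num)]

      by_cases ho : (cw.getD (k - 1) 0) % 2 ≠ 0
      · rw [if_pos (hcond.mpr ho), if_pos ho, PySem.Int.bxor_natCast]
        exact ih (fun q hq => hK q (by simp [hq])) (s ^^^ k)
      · rw [if_neg (fun hx => ho (hcond.mp hx)), if_neg ho]
        exact ih (fun q hq => hK q (by simp [hq])) s

theorem pv_sumFold (cw : List Int) (b : Nat) : ∀ (K : List Nat), (∀ k ∈ K, 1 ≤ k) → ∀ (a : Int),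
      (pvCast K).foldl (fun (s : Int) k =>
          if PySem.Int.band k ((2 ^ b : Nat) : Int) ≠ 0 then s + PySem.List.pyGetD cw (k - 1) 0 else s) a
        = K.foldl (fun s k => if k &&& 2 ^ b ≠ 0 then s + cw.getD (k - 1) 0 else s) a := by
  intro K
  induction K with
  | nil => intro _ a; simp [pvCast]
  | cons k K ih =>
      intro hK a
      have hk1 : 1 ≤ k := hK k (by simp)
      have hcast : ((k : Int)) - 1 = ((k - 1 : Nat) : Int) := by push_cast [hk1]; ring
      have hcc : pvCast (k :: K) = (k : Int) :: pvCast K := by simp [pvCast]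
      rw [hcc, List.foldl_cons, List.foldl_cons]
      have hband : PySem.Int.band (k : Int) ((2 ^ b : Nat) : Int) = ((k &&& 2 ^ b : Nat) : Int) :=
        PySem.Int.band_natCast k (2 ^ b)
      have hcond : (PySem.Int.band (k : Int) ((2 ^ b : Nat) : Int) ≠ 0) ↔ (k &&& 2 ^ b ≠ 0) := by
        rw [hband]; exact_mod_cast Iff.rfl
      by_cases hsel : k &&& 2 ^ b ≠ 0
      · rw [if_pos (hcond.mpr hsel), if_pos hsel, hcast, PySem.List.pyGetD_natCast]
        exact ih (fun q hq => hK q (by simp [hq])) _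
      · rw [if_neg (fun hx => hsel (hcond.mp hx)), if_neg hsel]
        exact ih (fun q hq => hK q (by simp [hq])) a

theorem pv_and_two_pow_ne {k b : Nat} : k &&& 2 ^ b ≠ 0 ↔ k.testBit b = true := by
  rw [Nat.and_two_pow]
  rcases hb : k.testBit b <;> simp [hb]

theorem pv_shift_mod (m b : Nat) : m >>> b % 2 = (m.testBit b).toNat := by
  rw [Nat.testBit, Nat.and_comm, Nat.and_one_is_mod]
  rcases Nat.mod_two_eq_zero_or_one (m >>> b) with h | h <;> simp [h]

theorem pv_xor_extract2 (f : Nat → Int) : ∀ (K : List Nat) (s : Nat),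
    K.foldl (fun s k => if (f k) % 2 ≠ 0 then s ^^^ k else s) s
      = s ^^^ K.foldl (fun s k => if (f k) % 2 ≠ 0 then s ^^^ k else s) 0 := by
  intro K
  induction K with
  | nil => intro s; simp
  | cons k K ih =>
      intro s
      rw [List.foldl_cons, List.foldl_cons, ih (if (f k) % 2 ≠ 0 then s ^^^ k else s),
          ih (if (f k) % 2 ≠ 0 then 0 ^^^ k else 0)]
      by_cases h : (f k) % 2 ≠ 0 <;> simp [h, Nat.xor_assoc]

theorem pv_sum_extract2 (f : Nat → Int) (b : Nat) : ∀ (K : List Nat) (a : Int),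
    K.foldl (fun s k => if k &&& 2 ^ b ≠ 0 then s + f k else s) a
      = a + K.foldl (fun s k => if k &&& 2 ^ b ≠ 0 then s + f k else s) 0 := by
  intro K
  induction K with
  | nil => intro a; simp
  | cons k K ih =>
      intro a
      rw [List.foldl_cons, List.foldl_cons, ih (if k &&& 2 ^ b ≠ 0 then a + f k else a),
          ih (if k &&& 2 ^ b ≠ 0 then 0 + f k else 0)]
      by_cases hh : k &&& 2 ^ b ≠ 0 <;> simp [hh] <;> ring

theorem pv_parityBit (f : Nat → Int) (b : Nat) : ∀ (K : List Nat),
    (K.foldl (fun (s : Int) k => if k &&& 2 ^ b ≠ 0 then s + f k else s) 0) % 2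
      = (((K.foldl (fun (s : Nat) k => if (f k) % 2 ≠ 0 then s ^^^ k else s) 0) >>> b % 2 : Nat) : Int) := by
  intro K
  induction K with
  | nil => simp
  | cons k K ih =>
      rw [List.foldl_cons, List.foldl_cons, pv_sum_extract2 f b K _, pv_xor_extract2 f K _]
      rw [pv_shift_mod] at ih
      rw [pv_shift_mod, Nat.testBit_xor]
      by_cases hsel : k &&& 2 ^ b ≠ 0
      · have hkb : k.testBit b = true := pv_and_two_pow_ne.mp hsel
        by_cases hodd : (f k) % 2 ≠ 0
        · rcases hxb : (K.foldl (fun s k => if (f k) % 2 ≠ 0 then s ^^^ k else s) 0).testBit b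
            <;> rw [hxb] at ih <;> simp [hsel, hodd, hkb, hxb, Int.add_emod] at ih ⊢ <;> omega
        · rcases hxb : (K.foldl (fun s k => if (f k) % 2 ≠ 0 then s ^^^ k else s) 0).testBit b
            <;> rw [hxb] at ih <;> simp [hsel, hodd, hkb, hxb, Int.add_emod] at ih ⊢ <;> omega
      · have hkb : k.testBit b = false := by
          rcases hx : k.testBit b
          · rfl
          · exact absurd (pv_and_two_pow_ne.mpr hx) hsel
        by_cases hodd : (f k) % 2 ≠ 0
        · rcases hxb : (K.foldl (fun s k => if (f k) % 2 ≠ 0 then s ^^^ k else s) 0).testBit b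
            <;> rw [hxb] at ih <;> simp [hsel, hodd, hkb, hxb, Int.add_emod] at ih ⊢ <;> omega
        · rcases hxb : (K.foldl (fun s k => if (f k) % 2 ≠ 0 then s ^^^ k else s) 0).testBit b
            <;> rw [hxb] at ih <;> simp [hsel, hodd, hkb, hxb, Int.add_emod] at ih ⊢ <;> omega

def pvSyn (cw : List Int) (n : Nat) : Nat :=
  (pvKeysN n).foldl (fun s k => if cw.getD (k - 1) 0 % 2 ≠ 0 then s ^^^ k else s) 0
def pvSumN (cw : List Int) (n b : Nat) : Int :=
  (pvKeysN n).foldl (fun s k => if k &&& 2 ^ b ≠ 0 then s + cw.getD (k - 1) 0 else s) 0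
def pvCanon (data : List Int) (r : Nat) : List Int :=
  let n := 2 ^ r - 1
  let cw := pvPlace data ((pvDkN n).zipIdx 0) (List.replicate n 2)
  (List.range r).foldl (fun c b => c.set (2 ^ b - 1) ((pvSyn cw n >>> b % 2 : Nat) : Int)) cw

theorem pv_getD_set_ne (l : List Int) (i j : Nat) (v : Int) (h : i ≠ j) :
    (l.set i v).getD j 0 = l.getD j 0 := by
  rw [List.getD_eq_getElem?_getD, List.getD_eq_getElem?_getD, List.getElem?_set_ne h]

theorem pv_keys_ge_one {n k : Nat} (h : k ∈ pvKeysN n) : 1 ≤ k ∧ k ≤ n := by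
  rcases List.mem_map.mp h with ⟨t, ht, rfl⟩
  have := List.mem_range.mp ht
  omega

theorem pv_evolve (cw : List Int) (n : Nat) : ∀ (m : Nat),
    ((List.range m).foldl (fun c' c => c'.set (2 ^ c - 1) (PySem.Int.mod (pvSumN c' n c) 2)) cw
       = (List.range m).foldl (fun c' c => c'.set (2 ^ c - 1) (PySem.Int.mod (pvSumN cw n c) 2)) cw)
      ∧ ∀ t, (∀ c, c < m → t ≠ 2 ^ c - 1) →
        ((List.range m).foldl (fun c' c => c'.set (2 ^ c - 1) (PySem.Int.mod (pvSumN c' n c) 2)) cw).getD t 0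
          = cw.getD t 0 := by
  intro m
  induction m with
  | zero => simp
  | succ m ih =>
      obtain ⟨ihEq, ihInv⟩ := ih
      rw [List.range_succ, List.foldl_append, List.foldl_append, List.foldl_cons, List.foldl_cons,
          List.foldl_nil, List.foldl_nil]
      have key : pvSumN ((List.range m).foldl
            (fun c' c => c'.set (2 ^ c - 1) (PySem.Int.mod (pvSumN c' n c) 2)) cw) n m
          = pvSumN cw n m := by
        unfold pvSumN
        apply PySem.List.foldl_congr_mem
        intro acc k hk
        by_cases hsel : k &&& 2 ^ m ≠ 0
        · rw [if_pos hsel, if_pos hsel]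
          congr 1
          apply ihInv
          intro c hc heq
          have hk1 := (pv_keys_ge_one hk).1
          have hc1 : (1 : Nat) ≤ 2 ^ c := Nat.one_le_two_pow
          have hkc : k = 2 ^ c := by omega
          rw [hkc, pv_two_pow_and (by omega)] at hsel
          exact hsel rfl
        · rw [if_neg hsel, if_neg hsel]
      constructor
      · rw [key, ihEq]
      · intro t ht
        have htm : t ≠ 2 ^ m - 1 := ht m (by omega)
        rw [pv_getD_set_ne _ _ _ _ (fun he => htm he.symm)]
        exact ihInv t (fun c hc => ht c (by omega))

theorem pv_pyRange_add (a : Int) (m : Nat) :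
    PySem.List.pyRange a (a + (m : Int)) = (List.range m).map (fun (k : Nat) => a + (k : Int)) := by
  induction m with
  | zero =>
      apply List.eq_nil_iff_forall_not_mem.mpr
      intro x hx
      rcases PySem.List.mem_pyRange_one.mp hx with ⟨h1, h2⟩
      omega
  | succ m ih =>
      have h : a + ((m + 1 : Nat) : Int) = (a + (m : Int)) + 1 := by push_cast; ring
      rw [h, PySem.List.pyRange_one_succ_right (by omega), ih, List.range_succ]
      simp

theorem pv_pyRange_nil {a b : Int} (h : b ≤ a) : PySem.List.pyRange a b = [] := by
  apply List.eq_nil_iff_forall_not_mem.mpr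
  intro x hx
  rcases PySem.List.mem_pyRange_one.mp hx with ⟨h1, h2⟩
  omega

theorem pv_keys_cast (n : Nat) :
    PySem.List.pyRange 1 ((n : Int) + 1) = pvCast (pvKeysN n) := by
  have h : ((n : Int) + 1) = 1 + (n : Int) := by ring
  rw [h, pv_pyRange_add]
  unfold pvCast pvKeysN
  rw [List.map_map]
  apply List.map_congr_left
  intro k _
  simp
  push_cast
  ring

theorem pv_castGetD (L : List Nat) (i : Nat) (h : i < L.length) :
    (pvCast L).getD i 0 = ((L[i] : Nat) : Int) := by
  have h2 : i < (pvCast L).length := by simpa [pvCast] using h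
  rw [List.getD_eq_getElem _ _ h2]
  simp [pvCast]

theorem pv_mem_parity {p n r : Nat} (hn : n = 2 ^ r - 1) (h1 : 1 ≤ p) (h2 : p ≤ n) :
    ((p : Int) ∈ (List.range r).map (fun c => ((2 ^ c : Nat) : Int))) ↔ pvPred p = false := by
  constructor
  · rintro hm
    rcases List.mem_map.mp hm with ⟨c, _, hc⟩
    have hc' : p = 2 ^ c := by exact_mod_cast hc.symm
    subst hc'
    simp [pvPred, pv_pow2_and_pred]
  · intro hpred
    have h0 : p &&& (p - 1) = 0 := by simpa [pvPred] using hpred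
    rcases pv_and_pred_pow2 h1 h0 with ⟨c, hc⟩
    have hcr : c < r := by
      by_contra hge
      have hle : 2 ^ r ≤ 2 ^ c := Nat.pow_le_pow_right (by norm_num) (by omega)
      have hp1 : (1:Nat) ≤ 2 ^ r := Nat.one_le_two_pow
      omega
    exact List.mem_map.mpr ⟨c, List.mem_range.mpr hcr, by rw [← hc]⟩

theorem pv_dkN_length (r : Nat) : (pvDkN (2 ^ r - 1)).length = 2 ^ r - 1 - r := by
  have h : (pvKeysN (2 ^ r - 1)).length
      = ((pvKeysN (2 ^ r - 1)).filter pvPred).length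
        + ((pvKeysN (2 ^ r - 1)).filter (fun x => !(pvPred x))).length :=
    List.length_eq_length_filter_add pvPred
  have h2 : ((pvKeysN (2 ^ r - 1)).filter (fun p => !(pvPred p))).length = r := by
    rw [pv_parityFilter]; simp
  have h3 : (pvKeysN (2 ^ r - 1)).length = 2 ^ r - 1 := by simp [pvKeysN]
  unfold pvDkN
  omega

theorem pv_dkN_mem {n p : Nat} (h : p ∈ pvDkN n) : 1 ≤ p ∧ p ≤ n := by
  unfold pvDkN at h
  exact pv_keys_ge_one (List.mem_of_mem_filter h)

theorem pv_dkN_eq (n : Nat) : pvDkN n = ((List.range (n - 2)).map (· + 3)).filter pvPred := by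
  rcases n with _ | _ | m
  · rfl
  · rfl
  · unfold pvDkN pvKeysN
    have hsplit : List.range (m + 2) = List.range 2 ++ (List.range m).map (fun x => 2 + x) := by
      rw [Nat.add_comm m 2]; exact List.range_add
    rw [hsplit, List.map_append, List.filter_append]
    have h12 : (List.filter pvPred ((List.range 2).map (· + 1))) = [] := by decide
    rw [h12]
    have hm : (m + 2) - 2 = m := by omega
    rw [List.nil_append]
    congr 1
    rw [show m + 1 + 1 - 2 = m from by omega, List.map_map]
    apply List.map_congr_left
    intro x _
    simp
    omega

theorem pv_parityApply (cw : List Int) (n r : Nat) :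
    (List.range r).foldl (fun c' c => c'.set (2 ^ c - 1) (PySem.Int.mod (pvSumN c' n c) 2)) cw
      = (List.range r).foldl (fun c' c => c'.set (2 ^ c - 1) ((pvSyn cw n >>> c % 2 : Nat) : Int)) cw := by
  rw [(pv_evolve cw n r).1]
  apply PySem.List.foldl_congr_mem
  intro acc c _
  congr 1
  rw [PySem.Int.mod_eq_emod_of_pos (by norm_num)]
  have h := pv_parityBit (fun k => cw.getD (k - 1) 0) c (pvKeysN n)
  beta_reduce at h
  exact h

theorem pv_counterFold0 (data : List Int) (P : List Nat) (hP : ∀ p ∈ P, 1 ≤ p) (cw : List Int) :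
    (pvCast P).foldl (fun (st : List Int × Int) pos =>
        if PySem.Int.band pos (pos - 1) ≠ 0 then
          (PySem.List.pySetD st.1 (pos - 1) (PySem.List.pyGetD data st.2 0), st.2 + 1)
        else st) (cw, 0)
      = (pvPlace data ((P.filter pvPred).zipIdx 0) cw, (((P.filter pvPred).length : Nat) : Int)) := by
  simpa using pv_counterFold data P hP cw 0

theorem pv_synFold0 (cw : List Int) (K : List Nat) (hK : ∀ k ∈ K, 1 ≤ k) :
    (pvCast K).foldl (fun (s : Int) pos =>
        if PySem.Int.band (PySem.List.pyGetD cw (pos - 1) 0) 1 ≠ 0 then PySem.Int.bxor s pos else s) 0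
      = ((K.foldl (fun s k => if cw.getD (k - 1) 0 % 2 ≠ 0 then s ^^^ k else s) 0 : Nat) : Int) := by
  simpa using pv_synFold cw K hK 0

theorem pv_B_eq (data : List Int) (r : Nat) :
    hamming_word_py_alt data (r : Int) = pvCanon data r := by
  unfold hamming_word_py_alt pvCanon
  simp only [Int.toNat_natCast]
  have hbl : (2 : Int) ^ r - 1 = ((2 ^ r - 1 : Nat) : Int) := by
    have h1 : (1 : Nat) ≤ 2 ^ r := Nat.one_le_two_pow
    push_cast [h1]; ring
  simp only [hbl, Int.toNat_natCast]
  set n := 2 ^ r - 1 with hn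
  -- placement stage
  have hplace : (PySem.List.pyRange 3 ((n : Int) + 1)).foldl (fun (st : List Int × Int) pos =>
      if PySem.Int.band pos (pos - 1) ≠ 0 then
        (PySem.List.pySetD st.1 (pos - 1) (PySem.List.pyGetD data st.2 0), st.2 + 1)
      else st) (List.replicate n 2, 0)
      = (pvPlace data ((pvDkN n).zipIdx 0) (List.replicate n 2),
         (((pvDkN n).length : Nat) : Int)) := by
    by_cases h2 : 2 ≤ n
    · have hr : ((n : Int) + 1) = 3 + ((n - 2 : Nat) : Int) := by push_cast [h2]; ring
      rw [hr, pv_pyRange_add]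
      have hcast : (List.range (n - 2)).map (fun (k : Nat) => 3 + (k : Int))
          = pvCast ((List.range (n - 2)).map (· + 3)) := by
        unfold pvCast
        rw [List.map_map]
        apply List.map_congr_left
        intro k _
        simp
        push_cast; ring
      rw [hcast,
          pv_counterFold0 data _ (by intro p hp; rcases List.mem_map.mp hp with ⟨t, _, rfl⟩; omega),
          ← pv_dkN_eq]
    · have hnil : PySem.List.pyRange 3 ((n : Int) + 1) = [] := pv_pyRange_nil (by omega)
      rw [hnil, List.foldl_nil]
      have hdk : pvDkN n = [] := by
        interval_cases n
        · rfl
        · rfl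
      rw [hdk]
      simp [pvPlace]
  rw [hplace]
  -- syndrome stage
  rw [pv_keys_cast, pv_synFold0 _ _ (fun k hk => (pv_keys_ge_one hk).1)]
  -- final stage
  rw [PySem.List.pyRange_zero_natCast, List.foldl_map]
  apply PySem.List.foldl_congr_mem
  intro acc c _
  simp only [Int.toNat_natCast]
  have hidx : (((1 : Nat) <<< c : Nat) : Int) - 1 = ((2 ^ c - 1 : Nat) : Int) := by
    have hs : (1 : Nat) <<< c = 2 ^ c := by rw [Nat.shiftLeft_eq, Nat.one_mul]
    have h1 : (1 : Nat) ≤ 2 ^ c := Nat.one_le_two_pow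
    rw [hs]; push_cast [h1]; ring
  rw [hidx, PySem.List.pySetD_natCast]
  congr 1
  rw [Int.shiftRight_natCast, show (1 : Int) = ((1 : Nat) : Int) from rfl,
      PySem.Int.band_natCast, Nat.and_one_is_mod]
  rfl

theorem pv_A_eq (data : List Int) (r : Nat) :
    hamming_word_py data (r : Int) = pvCanon data r := by
  unfold hamming_word_py pvCanon
  have hbl : (2 : Int) ^ r - 1 = ((2 ^ r - 1 : Nat) : Int) := by
    have h1 : (1 : Nat) ≤ 2 ^ r := Nat.one_le_two_pow
    push_cast [h1]; ring
  simp only [Int.toNat_natCast, hbl]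
  set n := 2 ^ r - 1 with hn
  have hrle : r ≤ n := by
    have := Nat.lt_two_pow_self (n := r)
    omega
  have hdl : (n : Int) - (r : Int) = ((n - r : Nat) : Int) := by push_cast [hrle]; ring
  have hpar : (PySem.List.pyRange 0 (r : Int)).map (fun x => (2:Int) ^ x.toNat)
      = (List.range r).map (fun c => ((2 ^ c : Nat) : Int)) := by
    rw [PySem.List.pyRange_zero_natCast, List.map_map]
    apply List.map_congr_left
    intro c _
    simp
  have hdk : (PySem.List.pyRange 1 ((n : Int) + 1)).filter
        (fun x => !(((PySem.List.pyRange 0 (r : Int)).map (fun x => (2:Int) ^ x.toNat)).contains x))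
      = pvCast (pvDkN n) := by
    rw [hpar, pv_keys_cast]
    unfold pvCast pvDkN
    rw [List.filter_map]
    congr 1
    apply List.filter_congr
    intro p hp
    simp only [Function.comp_def]
    have hb := pv_keys_ge_one hp
    have hmem := pv_mem_parity (p := p) hn hb.1 hb.2
    rcases hc : ((List.range r).map (fun c => ((2 ^ c : Nat) : Int))).contains ((p : Int))
    · have hpv : pvPred p = true := by
        rcases hpv : pvPred p
        · exact absurd (List.contains_iff_mem.mpr (hmem.mpr hpv)) (by rw [hc]; simp)
        · rfl
      rw [hpv]; rfl
    · have hm : (p : Int) ∈ (List.range r).map (fun c => ((2 ^ c : Nat) : Int)) :=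
        List.contains_iff_mem.mp hc
      rw [hmem.mp hm]; rfl
  have hcw0 : (PySem.List.pyRange 0 ((n : Int))).map (fun _ => (2:Int)) = List.replicate n 2 := by
    rw [PySem.List.pyRange_zero_natCast, List.map_map,
        show ((fun (_ : Int) => (2:Int)) ∘ fun (k : Nat) => (k : Int)) = (fun (_ : Nat) => (2:Int)) from rfl,
        List.map_const']
    simp
  rw [hdl, hdk, hcw0, hpar, pv_keys_cast]
  -- placement stage
  have hplace : (PySem.List.pyRange 0 ((n - r : Nat) : Int)).foldl (fun cw i =>
        PySem.List.pySetD cw (PySem.List.pyGetD (pvCast (pvDkN n)) i 0 - 1)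
          (PySem.List.pyGetD data i 0)) (List.replicate n 2)
      = pvPlace data ((pvDkN n).zipIdx 0) (List.replicate n 2) := by
    rw [PySem.List.pyRange_zero_natCast, List.foldl_map]
    have hlen : (pvDkN n).length = n - r := by rw [hn]; exact pv_dkN_length r
    have hbody : ∀ (cw : List Int) (i : Nat), i ∈ List.range (n - r) →
        PySem.List.pySetD cw (PySem.List.pyGetD (pvCast (pvDkN n)) ((i : Nat) : Int) 0 - 1)
            (PySem.List.pyGetD data ((i : Nat) : Int) 0)
          = cw.set ((pvDkN n).getD i 0 - 1) (data.getD (i + 0) 0) := by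
      intro cw i hi
      have hilt : i < (pvDkN n).length := by rw [hlen]; exact List.mem_range.mp hi
      rw [PySem.List.pyGetD_natCast, PySem.List.pyGetD_natCast, pv_castGetD _ _ hilt]
      have h1 : 1 ≤ (pvDkN n)[i] := (pv_dkN_mem (List.getElem_mem hilt)).1
      have hcast : (((pvDkN n)[i] : Nat) : Int) - 1 = (((pvDkN n)[i] - 1 : Nat) : Int) := by
        push_cast [h1]; ring
      rw [hcast, PySem.List.pySetD_natCast, List.getD_eq_getElem _ _ hilt, Nat.add_zero]
    rw [PySem.List.foldl_congr_mem _ _ _ _ hbody, show List.range (n - r)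
        = List.range (pvDkN n).length from by rw [hlen], pv_rangeFold data (pvDkN n) 0]
  rw [hplace]
  -- parity stage
  rw [List.foldl_map]
  have hstep : ∀ (cw : List Int) (c : Nat), c ∈ List.range r →
      PySem.List.pySetD cw (((2 ^ c : Nat) : Int) - 1)
          (PySem.Int.mod ((pvCast (pvKeysN n)).foldl (fun s k =>
            if PySem.Int.band k ((2 ^ c : Nat) : Int) ≠ 0 then s + PySem.List.pyGetD cw (k - 1) 0 else s) 0) 2)
        = cw.set (2 ^ c - 1) (PySem.Int.mod (pvSumN cw n c) 2) := by
    intro cw c _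
    have h1 : (1 : Nat) ≤ 2 ^ c := Nat.one_le_two_pow
    have hcast : (((2 ^ c : Nat)) : Int) - 1 = (((2 ^ c - 1 : Nat)) : Int) := by
      push_cast [h1]; ring
    rw [hcast, PySem.List.pySetD_natCast,
        pv_sumFold cw c (pvKeysN n) (fun k hk => (pv_keys_ge_one hk).1) 0]
    rfl
  rw [PySem.List.foldl_congr_mem _ _ _ _ hstep, pv_parityApply]

-- ===== VERDICT (by name: the statement is the Claim_ definition above) =====
theorem hamming_word_py_spec : Claim_equal_hamming_word_py := by
  intro data redundancy _ hpre
  unfold Spec_hamming_word_py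
  have hr : redundancy = (redundancy.toNat : Int) := (Int.toNat_of_nonneg hpre.1).symm
  rw [hr, pv_A_eq, pv_B_eq]
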